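-- pv_equiv track=rewrite | github.com/gbirhanu/chatbot | server/stem.py | find_R1_R2
-- ===== SOURCE A (Python) =====
-- vowel=['a','e','i','o','u']
--
-- consunant=['b','c','d','f','g','h',"'",'j','k','l','m','n','p','q','r','s','t','v','w','x','y','z',
--            'B','C','D','F','G','H','J','K','L','M','N','P','Q','R','S','T','V','W','X','Y','z']
--
-- def find_R1_R2(word):
--     word=word[1:]
--     R1=''
--     R2=''
--     v=0
--     ind=0
--     c=0
--     for i in word:
--         if i in consunant and v == 1 and c==0:
--             R1=word[ind+1:]
--             c=1
--         if i in consunant and v >= 2 and c==1: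
--             R2=word[ind+1:]
--             c=2
--         if i in vowel:
--             v=v+1
--         ind=ind+1
--     return R1,R2
-- ===== SOURCE B (Python) =====
-- vowel=['a','e','i','o','u']
--
-- consunant=['b','c','d','f','g','h',"'",'j','k','l','m','n','p','q','r','s','t','v','w','x','y','z',
--            'B','C','D','F','G','H','J','K','L','M','N','P','Q','R','S','T','V','W','X','Y','z']
--
-- def find_R1_R2(word):
--     # Prefix-table + two targeted scans instead of one fused stateful loop.
--     w = word[1:]
--     n = len(w)
--     pref = [0]
--     for ch in w:
--         pref.append(pref[-1] + (1 if ch in vowel else 0))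
--     R1 = ''
--     R2 = ''
--     p1 = -1
--     for i in range(n):
--         if w[i] in consunant and pref[i] == 1:
--             p1 = i
--             R1 = w[i+1:]
--             break
--     if p1 >= 0:
--         for j in range(p1 + 1, n):
--             if w[j] in consunant and pref[j] >= 2:
--                 R2 = w[j+1:]
--                 break
--     return R1, R2
-- ===== Notes on version B (the rewrite author's own statement) =====
-- stated objective: alternative
-- what changed: Replaced A's single fused stateful loop (state v,ind,c over word[1:]) by a cumulative vowel-count prefix table plus two targeted index scans: a first scan finds the R1 trigger position (consonant preceded by exactly one vowel), a second scan, run only if the first succeeded, finds the R2 trigger position (consonant preceded by at least two vowels).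
import Mathlib
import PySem

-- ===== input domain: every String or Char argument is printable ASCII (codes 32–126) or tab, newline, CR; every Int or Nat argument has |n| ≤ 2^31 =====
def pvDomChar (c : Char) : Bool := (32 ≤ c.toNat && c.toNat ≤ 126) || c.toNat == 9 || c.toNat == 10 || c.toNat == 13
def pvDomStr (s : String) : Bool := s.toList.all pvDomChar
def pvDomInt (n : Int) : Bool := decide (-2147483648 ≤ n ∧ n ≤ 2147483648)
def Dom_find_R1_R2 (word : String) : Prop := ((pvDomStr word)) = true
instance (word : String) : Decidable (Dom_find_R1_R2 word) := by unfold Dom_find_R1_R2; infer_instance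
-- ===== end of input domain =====

-- B replaces A's fused stateful loop by a vowel-count prefix table plus two targeted index scans (same cost; objective: alternative decomposition).

-- module-level constant lists, copied verbatim (including the duplicate 'z' and missing 'Z')
def vowList : List Char := ['a','e','i','o','u']
def consList : List Char :=
  ['b','c','d','f','g','h','\'','j','k','l','m','n','p','q','r','s','t','v','w','x','y','z',
   'B','C','D','F','G','H','J','K','L','M','N','P','Q','R','S','T','V','W','X','Y','z']

-- ===== PORT A =====
-- A's single for-loop over word[1:] with state R1,R2,v,ind,c
def loopA (w : List Char) (todo : List Char) (R1 R2 : List Char) (v ind c : Int) :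
    List Char × List Char :=
  match todo with
  | [] => (R1, R2)
  | i :: rest =>
    let R1' := if i ∈ consList ∧ v = 1 ∧ c = 0 then PySem.List.slice w (some (ind+1)) none else R1
    let c1 : Int := if i ∈ consList ∧ v = 1 ∧ c = 0 then 1 else c
    let R2' := if i ∈ consList ∧ v ≥ 2 ∧ c1 = 1 then PySem.List.slice w (some (ind+1)) none else R2
    let c2 : Int := if i ∈ consList ∧ v ≥ 2 ∧ c1 = 1 then 2 else c1
    let v' := if i ∈ vowList then v + 1 else v
    loopA w rest R1' R2' v' (ind+1) c2

def find_R1_R2 (word : String) : String × String :=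
  let w := PySem.List.slice word.toList (some 1) none   -- word = word[1:]
  let (r1, r2) := loopA w w [] [] 0 0 0
  (String.ofList r1, String.ofList r2)

-- ===== PORT B =====
def find_R1_R2_alt (word : String) : String × String :=
  let w := PySem.List.slice word.toList (some 1) none   -- w = word[1:]
  let n := w.length
  -- pref: cumulative vowel counts, pref[i] = vowels among w[:i]
  let pref := w.foldl
    (fun acc ch => acc ++ [PySem.List.pyGetD acc (-1) 0 + (if ch ∈ vowList then (1:Int) else 0)])
    [(0:Int)]
  -- first scan: first i with w[i] a consunant and exactly one vowel before it (for-break = find?)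
  match (PySem.List.pyRange 0 (n:Int) 1).find?
      (fun i => decide (PySem.List.pyGetD w i ' ' ∈ consList) &&
                decide (PySem.List.pyGetD pref i 0 = 1)) with
  | none => (String.ofList [], String.ofList [])
  | some i =>
    let R1 := PySem.List.slice w (some (i+1)) none
    -- second scan, only after p1 was found
    match (PySem.List.pyRange (i+1) (n:Int) 1).find?
        (fun j => decide (PySem.List.pyGetD w j ' ' ∈ consList) &&
                  decide (2 ≤ PySem.List.pyGetD pref j 0)) with
    | none => (String.ofList R1, String.ofList [])
    | some j => (String.ofList R1, String.ofList (PySem.List.slice w (some (j+1)) none))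

-- ===== PRECONDITION & SPEC =====
def Spec_find_R1_R2 (word : String) (out : String × String) : Prop := out = find_R1_R2_alt word
instance (word : String) (out : String × String) : Decidable (Spec_find_R1_R2 word out) := by unfold Spec_find_R1_R2; infer_instance

-- ===== CLAIM (what is proved, stated in full; the proofs are below) =====
def Claim_equal_find_R1_R2 : Prop := ∀ (word : String), Dom_find_R1_R2 word → Spec_find_R1_R2 word (find_R1_R2 word)

-- ===== LEMMAS AND PROOFS =====

def vcntN (l : List Char) : Nat := l.countP (fun ch => decide (ch ∈ vowList))

def Q1 (w : List Char) (k : Nat) : Bool :=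
  decide (w.getD k ' ' ∈ consList) && decide (vcntN (w.take k) = 1)

def Q2 (w : List Char) (k : Nat) : Bool :=
  decide (w.getD k ' ' ∈ consList) && decide (2 ≤ vcntN (w.take k))

theorem vstep (w : List Char) (k : Nat) (hk : k < w.length) :
    (vcntN (w.take (k+1)) : Int) = (vcntN (w.take k) : Int) + (if w[k] ∈ vowList then 1 else 0) := by
  simp only [vcntN, List.take_add_one, List.getElem?_eq_getElem hk, Option.toList_some,
    List.countP_append, List.countP_singleton]
  split_ifs with h <;> simp_all
theorem phase2 (w : List Char) (todo R1 R2 : List Char) (v ind : Int) :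
    loopA w todo R1 R2 v ind 2 = (R1, R2) := by
  induction todo generalizing v ind with
  | nil => rfl
  | cons i rest ih => simp [loopA, ih]


theorem getD_at (w : List Char) (k : Nat) (hk : k < w.length) (d : Char) :
    w.getD k d = w[k] := by
  simp [List.getD_eq_getElem?_getD, List.getElem?_eq_getElem hk]

theorem cast_add_one (k : Nat) : ((k:Int)+1) = ((k+1 : Nat) : Int) := by push_cast; ring

theorem slice_suffix (w : List Char) (k : Nat) :
    PySem.List.slice w (some ((k:Int)+1)) none = w.drop (k+1) := by
  rw [cast_add_one, PySem.List.slice_from_natCast]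

theorem phase1 (w : List Char) (todo : List Char) (k : Nat) (R1 R2 : List Char)
    (h : todo = w.drop k) :
    loopA w todo R1 R2 (vcntN (w.take k) : Int) (k : Int) 1 =
      (R1, match (List.range' k (w.length - k)).find? (Q2 w) with
           | none => R2
           | some q => w.drop (q+1)) := by
  induction todo generalizing k R1 R2 with
  | nil =>
    have hlen := congrArg List.length h
    simp only [List.length_nil, List.length_drop] at hlen
    have : w.length - k = 0 := by omega
    simp [loopA, this]
  | cons i rest ih =>
    have hk : k < w.length := by
      by_contra hc
      rw [List.drop_eq_nil_of_le (by omega)] at h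
      simp at h
    have hdk : w.drop k = w[k] :: w.drop (k+1) := List.drop_eq_getElem_cons hk
    rw [← h] at hdk
    have hi : i = w[k] := by injection hdk
    have hrest : rest = w.drop (k+1) := by injection hdk
    have hrange : List.range' k (w.length - k) = k :: List.range' (k+1) (w.length - (k+1)) := by
      have : w.length - k = (w.length - (k+1)) + 1 := by omega
      rw [this, List.range'_succ]
    rw [loopA]
    have h10 : ¬(i ∈ consList ∧ (vcntN (w.take k) : Int) = 1 ∧ (1:Int) = 0) := by
      rintro ⟨-, -, hc⟩; norm_num at hc
    simp only [if_neg h10, and_true]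
    by_cases hq : Q2 w k = true
    · have hq' := hq
      simp only [Q2, Bool.and_eq_true, decide_eq_true_eq, getD_at w k hk] at hq'
      have hcond : i ∈ consList ∧ (vcntN (w.take k) : Int) ≥ 2 :=
        ⟨hi ▸ hq'.1, by exact_mod_cast hq'.2⟩
      simp only [if_pos hcond]
      rw [phase2, slice_suffix, hrange]
      simp only [List.find?_cons, hq]
    · have hcond : ¬(i ∈ consList ∧ (vcntN (w.take k) : Int) ≥ 2) := by
        rintro ⟨h1, h2⟩
        apply hq
        simp only [Q2, Bool.and_eq_true, decide_eq_true_eq, getD_at w k hk]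
        exact ⟨hi ▸ h1, by exact_mod_cast h2⟩
      simp only [if_neg hcond]
      have hv' : (if i ∈ vowList then (vcntN (w.take k) : Int) + 1 else (vcntN (w.take k) : Int))
          = (vcntN (w.take (k+1)) : Int) := by
        rw [vstep w k hk, hi]
        split_ifs <;> simp
      rw [hv', cast_add_one, ih (k+1) R1 R2 hrest, hrange]
      have hqf : Q2 w k = false := by simpa using hq
      simp only [List.find?_cons, hqf]

def specA (w : List Char) : List Char × List Char :=
  match (List.range' 0 w.length).find? (Q1 w) with
  | none => ([], [])
  | some p =>
    (w.drop (p+1),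
     match (List.range' (p+1) (w.length - (p+1))).find? (Q2 w) with
     | none => []
     | some q => w.drop (q+1))

theorem phase0 (w : List Char) (todo : List Char) (k : Nat) (R1 R2 : List Char)
    (h : todo = w.drop k) :
    loopA w todo R1 R2 (vcntN (w.take k) : Int) (k : Int) 0 =
      (match (List.range' k (w.length - k)).find? (Q1 w) with
       | none => (R1, R2)
       | some p =>
         (w.drop (p+1),
          match (List.range' (p+1) (w.length - (p+1))).find? (Q2 w) with
          | none => R2
          | some q => w.drop (q+1))) := by
  induction todo generalizing k R1 R2 with
  | nil =>
    have hlen := congrArg List.length h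
    simp only [List.length_nil, List.length_drop] at hlen
    have : w.length - k = 0 := by omega
    simp [loopA, this]
  | cons i rest ih =>
    have hk : k < w.length := by
      by_contra hc
      rw [List.drop_eq_nil_of_le (by omega)] at h
      simp at h
    have hdk : w.drop k = w[k] :: w.drop (k+1) := List.drop_eq_getElem_cons hk
    rw [← h] at hdk
    have hi : i = w[k] := by injection hdk
    have hrest : rest = w.drop (k+1) := by injection hdk
    have hrange : List.range' k (w.length - k) = k :: List.range' (k+1) (w.length - (k+1)) := by
      have : w.length - k = (w.length - (k+1)) + 1 := by omega
      rw [this, List.range'_succ]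
    rw [loopA]
    have hv' : (if i ∈ vowList then (vcntN (w.take k) : Int) + 1 else (vcntN (w.take k) : Int))
        = (vcntN (w.take (k+1)) : Int) := by
      rw [vstep w k hk, hi]
      split_ifs <;> simp
    by_cases hq : Q1 w k = true
    · have hq' := hq
      simp only [Q1, Bool.and_eq_true, decide_eq_true_eq, getD_at w k hk] at hq'
      have hcond : i ∈ consList ∧ (vcntN (w.take k) : Int) = 1 :=
        ⟨hi ▸ hq'.1, by exact_mod_cast hq'.2⟩
      have hcond2 : ¬(i ∈ consList ∧ (vcntN (w.take k) : Int) ≥ 2) := by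
        rintro ⟨-, h2⟩
        have := hcond.2
        omega
      simp only [and_true, if_pos hcond, if_neg hcond2]
      rw [hv', cast_add_one, phase1 w rest (k+1) _ R2 hrest, PySem.List.slice_from_natCast, hrange]
      simp only [List.find?_cons, hq]
    · have hqn : ¬(i ∈ consList ∧ (vcntN (w.take k) : Int) = 1) := by
        rintro ⟨h1, h2⟩
        apply hq
        simp only [Q1, Bool.and_eq_true, decide_eq_true_eq, getD_at w k hk]
        exact ⟨hi ▸ h1, by exact_mod_cast h2⟩
      have h01 : ((0:Int) = 1) = False := by norm_num
      simp only [and_true, if_neg hqn, h01, and_false, if_false]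
      rw [hv', cast_add_one, ih (k+1) R1 R2 hrest, hrange]
      have hqf : Q1 w k = false := by simpa using hq
      simp only [List.find?_cons, hqf]

theorem A_eq_spec (w : List Char) :
    loopA w w [] [] 0 0 0 = specA w := by
  have h := phase0 w w 0 [] [] (by simp)
  simp only [List.take_zero, Nat.sub_zero, Nat.cast_zero] at h
  have hv0 : vcntN ([] : List Char) = 0 := rfl
  rw [hv0] at h
  simpa [specA] using h

theorem find?_congr' {α : Type} (l : List α) (p q : α → Bool)
    (h : ∀ x ∈ l, p x = q x) : l.find? p = l.find? q := by
  induction l with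
  | nil => rfl
  | cons a l ih =>
    simp only [List.find?_cons]
    rw [h a (by simp)]
    cases q a
    · exact ih (fun x hx => h x (by simp [hx]))
    · rfl

theorem vcnt_singleton (ch : Char) :
    (vcntN [ch] : Int) = (if ch ∈ vowList then (1:Int) else 0) := by
  simp only [vcntN, List.countP_singleton]
  split_ifs with h <;> simp_all

theorem vcnt_cons (ch : Char) (l : List Char) :
    (vcntN (ch :: l) : Int) = (vcntN [ch] : Int) + (vcntN l : Int) := by
  simp [vcntN, List.countP_cons]
  ring

theorem pref_spec' (todo : List Char) : ∀ (acc : List Int) (hne : acc ≠ []) (c0 : Int),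
    acc.getLast hne = c0 →
    todo.foldl (fun acc ch => acc ++ [PySem.List.pyGetD acc (-1) 0 + (if ch ∈ vowList then (1:Int) else 0)]) acc
      = acc ++ (List.range todo.length).map (fun j => c0 + (vcntN (todo.take (j+1)) : Int)) := by
  induction todo with
  | nil => intro acc hne c0 h; simp
  | cons ch rest ih =>
    intro acc hne c0 hlast
    simp only [List.foldl_cons]
    rw [PySem.List.pyGetD_neg_one acc 0 hne, hlast]
    rw [ih (acc ++ [c0 + (if ch ∈ vowList then (1:Int) else 0)]) (by simp)
        (c0 + (if ch ∈ vowList then (1:Int) else 0)) (List.getLast_concat ..)]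
    rw [List.length_cons, List.range_succ_eq_map, List.map_cons, List.map_map, List.append_assoc]
    congr 1
    rw [List.singleton_append]
    congr 1
    · rw [List.take_succ_cons, List.take_zero, ← vcnt_singleton]
    · apply List.map_congr_left
      intro j hj
      simp only [Function.comp_apply, List.take_succ_cons]
      rw [vcnt_cons, vcnt_singleton]
      ring

theorem prefGetD (w : List Char) (k : Nat) (hk : k ≤ w.length) :
    (w.foldl (fun acc ch => acc ++ [PySem.List.pyGetD acc (-1) 0 + (if ch ∈ vowList then (1:Int) else 0)]) [(0:Int)]).getD k 0
      = (vcntN (w.take k) : Int) := by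
  rw [pref_spec' w [0] (by simp) 0 rfl]
  cases k with
  | zero => simp [vcntN]
  | succ j =>
    have hj : j < w.length := by omega
    rw [List.singleton_append, List.getD_cons_succ,
        List.getD_eq_getElem?_getD, List.getElem?_map, List.getElem?_range hj]
    simp

theorem B_eq (word : String) :
    find_R1_R2_alt word =
      (String.ofList (specA (PySem.List.slice word.toList (some 1) none)).1,
       String.ofList (specA (PySem.List.slice word.toList (some 1) none)).2) := by
  simp only [find_R1_R2_alt]
  generalize PySem.List.slice word.toList (some 1) none = w
  have h1 : PySem.List.pyRange 0 (w.length : Int) 1 = (List.range w.length).map (fun (k : Nat) => (k : Int)) := by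
    rw [PySem.List.pyRange_one]
    have ht : ((w.length:Int) - 0).toNat = w.length := by omega
    rw [ht]
    apply List.map_congr_left
    intro k _
    exact zero_add _
  rw [h1, List.find?_map]
  have h2 : (List.range w.length).find?
      ((fun i => decide (PySem.List.pyGetD w i ' ' ∈ consList) &&
                decide (PySem.List.pyGetD (w.foldl (fun acc ch => acc ++ [PySem.List.pyGetD acc (-1) 0 + (if ch ∈ vowList then (1:Int) else 0)]) [(0:Int)]) i 0 = 1)) ∘ (fun (k : Nat) => (k : Int)))
      = (List.range w.length).find? (Q1 w) := by
    apply find?_congr'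
    intro k hk
    rw [List.mem_range] at hk
    simp only [Function.comp_apply, PySem.List.pyGetD_natCast, prefGetD w k (le_of_lt hk), Q1]
    congr 1
    apply decide_eq_decide.mpr
    omega
  rw [h2, specA, ← List.range_eq_range']
  cases hfind : (List.range w.length).find? (Q1 w) with
  | none => simp
  | some p =>
    have hp : p < w.length := by
      have := List.mem_range.mp (List.mem_of_find?_eq_some hfind)
      exact this
    simp only [Option.map_some]
    rw [cast_add_one p, PySem.List.slice_from_natCast]
    have h3 : PySem.List.pyRange (((p+1 : Nat)):Int) (w.length : Int) 1
        = (List.range' (p+1) (w.length - (p+1))).map (fun (k : Nat) => (k : Int)) := by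
      rw [PySem.List.pyRange_one, List.range'_eq_map_range]
      have ht : ((w.length:Int) - ((p+1 : Nat):Int)).toNat = w.length - (p+1) := by omega
      rw [ht, List.map_map]
      apply List.map_congr_left
      intro k hk
      simp only [Function.comp_apply]
      push_cast
      ring
    rw [h3, List.find?_map]
    have h4 : (List.range' (p+1) (w.length - (p+1))).find?
        ((fun j => decide (PySem.List.pyGetD w j ' ' ∈ consList) &&
                  decide (2 ≤ PySem.List.pyGetD (w.foldl (fun acc ch => acc ++ [PySem.List.pyGetD acc (-1) 0 + (if ch ∈ vowList then (1:Int) else 0)]) [(0:Int)]) j 0)) ∘ (fun (k : Nat) => (k : Int)))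
        = (List.range' (p+1) (w.length - (p+1))).find? (Q2 w) := by
      apply find?_congr'
      intro k hk
      rw [List.mem_range'] at hk
      obtain ⟨m, hm, rfl⟩ := hk
      simp only [one_mul]
      have hkle : p + 1 + m ≤ w.length := by omega
      simp only [Function.comp_apply, PySem.List.pyGetD_natCast, prefGetD w _ hkle, Q2]
      congr 1
      apply decide_eq_decide.mpr
      omega
    rw [h4]
    cases hfind2 : (List.range' (p+1) (w.length - (p+1))).find? (Q2 w) with
    | none => simp
    | some q =>
      simp only [Option.map_some]
      rw [cast_add_one q, PySem.List.slice_from_natCast]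

-- ===== VERDICT (by name: the statement is the Claim_ definition above) =====
theorem find_R1_R2_spec : Claim_equal_find_R1_R2 := by
  intro word _
  show find_R1_R2 word = find_R1_R2_alt word
  rw [B_eq word]
  simp only [find_R1_R2]
  rw [A_eq_spec]
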